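-- pv_equiv track=rewrite | github.com/bpsong/qa_extracted_data | utils/schema_editor_view.py | validate_field_names
-- ===== SOURCE A (Python) =====
-- from typing import Dict, Any, List, Optional, Tuple
--
-- def validate_field_names(fields: Dict[str, Any]) -> List[str]:
--     """
--     Validate field name uniqueness and format checking.
--
--     Args:
--         fields: Dictionary of field configurations
--
--     Returns:
--         List of validation errors
--     """
--     errors = []
--
--     try:
--         field_names = list(fields.keys())
--
--         # Check for empty field names
--         for field_name in field_names:
--             errors.extend(_validate_single_field_name(field_name))
--
--         # Check for duplicate field names (case-insensitive)
--         lower_names = [name.lower() for name in field_names if isinstance(name, str)]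
--         if len(lower_names) != len(set(lower_names)):
--             errors.append("Field names must be unique (case-insensitive)")
--
--         # Check for reserved field names
--         reserved_names = ['id', 'type', 'class', 'name', 'value']
--         for field_name in field_names:
--             if isinstance(field_name, str) and field_name.lower() in reserved_names:
--                 errors.append(f"Field name '{field_name}' is reserved and cannot be used")
--
--     except Exception as e:
--         errors.append(f"Error validating field names: {str(e)}")
--
--     return errors
--
-- def _validate_single_field_name(field_name: Any) -> List[str]:
--     """Validate a single field name and return its validation errors."""
--     if not field_name or not isinstance(field_name, str):
--         return ["Field names must be non-empty strings"]
--     if len(field_name.strip()) == 0: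
--         return ["Field names cannot be empty or only whitespace"]
--     if len(field_name) > 100:
--         return [f"Field name '{field_name}' is too long (max 100 characters)"]
--     return []
-- ===== SOURCE B (Python) =====
-- def validate_field_names(fields):
--     """Single-pass re-implementation: one loop maintains a 'seen' set of
--     lowercased names, a duplicate flag and two separate error lists; the
--     result is format_errors + optional duplicate message + reserved_errors."""
--     reserved = ('id', 'type', 'class', 'name', 'value')
--     format_errors = []
--     reserved_errors = []
--     seen = set()
--     has_duplicate = False
--     for name in fields:
--         if not name or not isinstance(name, str):
--             format_errors.append("Field names must be non-empty strings")
--         elif len(name.strip()) == 0: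
--             format_errors.append("Field names cannot be empty or only whitespace")
--         elif len(name) > 100:
--             format_errors.append(f"Field name '{name}' is too long (max 100 characters)")
--         if isinstance(name, str):
--             low = name.lower()
--             if low in seen:
--                 has_duplicate = True
--             seen.add(low)
--             if low in reserved:
--                 reserved_errors.append(f"Field name '{name}' is reserved and cannot be used")
--     result = list(format_errors)
--     if has_duplicate:
--         result.append("Field names must be unique (case-insensitive)")
--     return result + reserved_errors
-- ===== Notes on version B (the rewrite author's own statement) =====
-- stated objective: alternative
-- what changed: Replaces A's three separate passes (per-name format check, length-vs-set duplicate test, reserved scan) by a single loop that maintains a seen-set of lowercased names with a duplicate flag and accumulates format and reserved errors in two local lists, assembling the result afterwards.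
import Mathlib
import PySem

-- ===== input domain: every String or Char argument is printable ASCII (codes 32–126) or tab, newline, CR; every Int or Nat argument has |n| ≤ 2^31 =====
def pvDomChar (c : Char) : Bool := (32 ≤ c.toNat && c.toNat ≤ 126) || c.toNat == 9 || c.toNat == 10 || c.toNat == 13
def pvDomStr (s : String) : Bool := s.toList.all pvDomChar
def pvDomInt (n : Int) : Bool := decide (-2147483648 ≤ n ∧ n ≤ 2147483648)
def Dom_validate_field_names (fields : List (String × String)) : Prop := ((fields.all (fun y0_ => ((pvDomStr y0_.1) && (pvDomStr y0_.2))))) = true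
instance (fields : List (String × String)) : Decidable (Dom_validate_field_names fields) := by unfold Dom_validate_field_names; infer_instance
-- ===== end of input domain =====

-- B is an alternative single-pass implementation of A's three validation passes; same cost.

-- ===== PORT A =====
-- helper `_validate_single_field_name` (names are always str here, so the isinstance
-- check reduces to the truthiness test `not field_name`, i.e. the empty string)
def pvSingleFieldName (s : String) : List String :=
  if s = "" then ["Field names must be non-empty strings"]
  else if PySem.Str.len (PySem.Str.strip s) = 0 then ["Field names cannot be empty or only whitespace"]
  else if 100 < PySem.Str.len s then ["Field name '" ++ s ++ "' is too long (max 100 characters)"]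
  else []

def validate_field_names (fields : List (String × String)) : List String :=
  let field_names := (PySem.Dict.ofList fields).keys
  let errors := field_names.foldl (fun e n => e ++ pvSingleFieldName n) []
  let lower_names := field_names.map PySem.Str.lower
  let errors := if lower_names.length ≠ (PySem.Set.ofList lower_names).length
    then errors ++ ["Field names must be unique (case-insensitive)"] else errors
  field_names.foldl (fun e n =>
    if PySem.Str.lower n ∈ ["id", "type", "class", "name", "value"]
    then e ++ ["Field name '" ++ n ++ "' is reserved and cannot be used"] else e) errors

-- ===== PORT B =====
-- inline format check of Source B's loop body (if/elif chain)
def altFormatCheck (s : String) : List String :=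
  if s = "" then ["Field names must be non-empty strings"]
  else if PySem.Str.len (PySem.Str.strip s) = 0 then ["Field names cannot be empty or only whitespace"]
  else if 100 < PySem.Str.len s then ["Field name '" ++ s ++ "' is too long (max 100 characters)"]
  else []

-- the single pass: state = (seen set, format errors, reserved errors, duplicate flag)
def altLoop : List String → PySem.Set String → List String → List String → Bool →
    List String × List String × Bool
  | [], _, fmt, res, dup => (fmt, res, dup)
  | n :: t, seen, fmt, res, dup =>
    let low := PySem.Str.lower n
    altLoop t (PySem.Set.add seen low) (fmt ++ altFormatCheck n)
      (if low ∈ ["id", "type", "class", "name", "value"]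
       then res ++ ["Field name '" ++ n ++ "' is reserved and cannot be used"] else res)
      (dup || PySem.Set.contains seen low)

def validate_field_names_alt (fields : List (String × String)) : List String :=
  let names := (PySem.Dict.ofList fields).keys
  match altLoop names PySem.Set.empty [] [] false with
  | (fmt, res, dup) =>
    fmt ++ (if dup then ["Field names must be unique (case-insensitive)"] else []) ++ res

-- ===== PRECONDITION & SPEC =====
def Spec_validate_field_names (fields : List (String × String)) (out : List String) : Prop := out = validate_field_names_alt fields
instance (fields : List (String × String)) (out : List String) : Decidable (Spec_validate_field_names fields out) := by unfold Spec_validate_field_names; infer_instance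

-- ===== CLAIM (what is proved, stated in full; the proofs are below) =====
def Claim_equal_validate_field_names : Prop := ∀ (fields : List (String × String)), Dom_validate_field_names fields → Spec_validate_field_names fields (validate_field_names fields)

-- ===== LEMMAS AND PROOFS =====

-- closed form of the duplicate flag swept by altLoop
def dupB : PySem.Set String → List String → Bool
  | _, [] => false
  | seen, l :: t => PySem.Set.contains seen l || dupB (PySem.Set.add seen l) t

theorem contains_eq_decide_mem (seen : PySem.Set String) (l : String) :
    PySem.Set.contains seen l = decide (l ∈ seen) := by
  by_cases hc : l ∈ seen <;> simp [PySem.Set.contains, hc]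

theorem dupB_eq (ls : List String) : ∀ (seen : PySem.Set String),
    dupB seen ls = decide (¬ (ls.Nodup ∧ ∀ x ∈ ls, x ∉ seen)) := by
  induction ls with
  | nil => intro seen; simp [dupB]
  | cons l t ih =>
    intro seen
    rw [dupB, ih, contains_eq_decide_mem, ← Bool.decide_or, decide_eq_decide]
    constructor
    · rintro (h | h)
      · exact fun hh => hh.2 l (List.mem_cons_self) h
      · rintro ⟨hnd, hall⟩
        apply h
        refine ⟨(List.nodup_cons.mp hnd).2, ?_⟩
        intro x hx hxa
        rcases (PySem.Set.mem_add seen l x).mp hxa with hxs | hxl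
        · exact hall x (List.mem_cons_of_mem l hx) hxs
        · exact (List.nodup_cons.mp hnd).1 (hxl ▸ hx)
    · intro h
      by_cases hc : l ∈ seen
      · exact Or.inl hc
      · right
        rintro ⟨hnd, hall⟩
        apply h
        refine ⟨List.nodup_cons.mpr ⟨?_, hnd⟩, ?_⟩
        · intro hlt
          exact hall l hlt ((PySem.Set.mem_add seen l l).mpr (Or.inr rfl))
        · intro x hx
          rcases List.mem_cons.mp hx with rfl | hxt
          · exact hc
          · intro hxs
            exact hall x hxt ((PySem.Set.mem_add seen l x).mpr (Or.inl hxs))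

theorem length_foldl_add_le (ls : List String) : ∀ (s : PySem.Set String),
    (List.foldl PySem.Set.add s ls).length ≤ s.length + ls.length := by
  induction ls with
  | nil => intro s; simp
  | cons l t ih =>
    intro s
    have h2 := ih (PySem.Set.add s l)
    have h3 : (PySem.Set.add s l).length ≤ s.length + 1 := by
      simp only [PySem.Set.add]
      split
      · omega
      · simp
    simp only [List.foldl_cons, List.length_cons]
    omega

theorem length_foldl_add_eq_iff (ls : List String) : ∀ (s : PySem.Set String), s.Nodup →
    ((List.foldl PySem.Set.add s ls).length = s.length + ls.length ↔ (s ++ ls).Nodup) := by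
  induction ls with
  | nil => intro s hs; simpa using hs
  | cons l t ih =>
    intro s hs
    simp only [List.foldl_cons]
    by_cases hc : l ∈ s
    · have hadd : PySem.Set.add s l = s := by simp [PySem.Set.add, hc]
      have hle := length_foldl_add_le t s
      rw [hadd]
      constructor
      · intro h; simp only [List.length_cons] at h; omega
      · intro h
        exact ((List.nodup_append.mp h).2.2 l hc l (List.mem_cons_self) rfl).elim
    · have hadd : PySem.Set.add s l = s ++ [l] := by simp [PySem.Set.add, hc]
      have hs' : (s ++ [l]).Nodup := by
        rw [List.nodup_append]
        refine ⟨hs, List.nodup_singleton l, ?_⟩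
        intro x hx b hb
        simp only [List.mem_singleton] at hb
        subst hb
        exact fun e => hc (e ▸ hx)
      rw [hadd,
        show s.length + (l :: t).length = (s ++ [l]).length + t.length by simp; omega,
        show s ++ l :: t = s ++ [l] ++ t by simp,
        ih (s ++ [l]) hs']

-- A's length-vs-set duplicate test produces the same message block as B's flag
theorem dup_cond_eq (ls : List String) :
    (if ls.length ≠ (PySem.Set.ofList ls).length
     then ["Field names must be unique (case-insensitive)"] else ([] : List String))
    = (if dupB PySem.Set.empty ls = true
       then ["Field names must be unique (case-insensitive)"] else []) := by
  have h1 : (PySem.Set.ofList ls).length = ls.length ↔ ls.Nodup := by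
    rw [PySem.Set.ofList_eq_foldl]
    simpa using length_foldl_add_eq_iff ls [] (by simp)
  have h2 : dupB PySem.Set.empty ls = decide (¬ ls.Nodup) := by
    rw [dupB_eq]
    simp [PySem.Set.empty]
  rw [h2]
  by_cases hn : ls.Nodup
  · simp [hn, h1.mpr hn]
  · have hne : ls.length ≠ (PySem.Set.ofList ls).length := fun he => hn (h1.mp he.symm)
    simp [hn, hne]

-- appending-inside-an-if pulled out ('if c: e += [m]' = e ++ (if c then [m] else []))
theorem ite_append_nil {c : Prop} [Decidable c] (e m : List String) :
    (if c then e ++ m else e) = e ++ if c then m else [] := by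
  split <;> simp

-- a conditional extend is the filtered map ('if p(x): out.append(m(x))')
theorem flatMap_ite {α β : Type} (p : α → Prop) [DecidablePred p] (m : α → β) (l : List α) :
    l.flatMap (fun x => if p x then [m x] else []) =
      (l.filter (fun x => decide (p x))).map m := by
  induction l with
  | nil => rfl
  | cons x t ih =>
    simp only [List.flatMap_cons, List.filter_cons, ih]
    by_cases hp : p x <;> simp [hp]

-- closed form of the whole single pass
theorem altLoop_eq (names : List String) :
    ∀ (seen : PySem.Set String) (fmt res : List String) (dup : Bool),
    altLoop names seen fmt res dup =
      (fmt ++ names.flatMap altFormatCheck,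
       res ++ (names.filter (fun n => decide (PySem.Str.lower n ∈ ["id", "type", "class", "name", "value"]))).map
         (fun n => "Field name '" ++ n ++ "' is reserved and cannot be used"),
       dup || dupB seen (names.map PySem.Str.lower)) := by
  induction names with
  | nil => intro seen fmt res dup; simp [altLoop, dupB]
  | cons n t ih =>
    intro seen fmt res dup
    simp only [altLoop, ih, List.flatMap_cons, List.map_cons, List.filter_cons, dupB,
      Prod.mk.injEq]
    refine ⟨by simp, ?_, by simp [Bool.or_assoc]⟩
    by_cases hm : PySem.Str.lower n ∈ ["id", "type", "class", "name", "value"] <;>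
      simp [hm]

theorem format_check_eq : altFormatCheck = pvSingleFieldName := rfl

theorem validate_field_names_spec' (fields : List (String × String)) :
    validate_field_names fields = validate_field_names_alt fields := by
  unfold validate_field_names validate_field_names_alt
  simp only [altLoop_eq, ite_append_nil, PySem.List.foldl_append_eq_flatMap, flatMap_ite,
    format_check_eq, dup_cond_eq, List.nil_append, Bool.false_or, List.append_assoc]

-- ===== VERDICT (by name: the statement is the Claim_ definition above) =====
theorem validate_field_names_spec : Claim_equal_validate_field_names := by
  intro fields _
  exact validate_field_names_spec' fields
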